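-- pv_equiv track=rewrite | github.com/IceCream0818/small-projects | Hawaiian Pronunciation App/hawaiianPronunciation.py | pronounce
-- ===== SOURCE A (Python) =====
-- consonants = "pkhlmnw' "
--
-- vowels = {"a":"ah", "e":"eh", "i":"ee", "o":"oh", "u":"oo"}
--
-- doubleVowels = {"ai":"eye", "ae":"eye", "ao":"ow", "au":"ow", "ei":"ay", "eu":"eh-oo",
--                 "iu":"ew", "oi":"oyo", "ou":"ow", "ui":"ooey"}
--
-- def pronounce(text):
--     output = ""
--     index = 0
--     text = text.lower()
--
--     while index < len(text):
--         if index + 1 < len(text) and text[index:index+2] in doubleVowels: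
--             output += doubleVowels[text[index:index+2]]
--             index += 2
--         elif text[index] in vowels:
--             output += vowels[text[index]] + "-"
--             index += 1
--         elif text[index] == ' ':
--             if output[-1] == '-':
--                 output = output[:-1]
--             output += text[index]
--             index += 1
--         elif text[index] in consonants:
--             output += text[index]
--             index += 1
--         else:
--             index += 1
--
--         #handle double vowels using slide index += 2
--         #otherwise check if vowel index += 1
--         #otherwise it's "consonant" index += 1
--     if output[-1] == "-":
--         output = output[:-1]
--     return output
-- ===== SOURCE B (Python) =====
-- # B: split the lowered text into space-separated chunks, pronounce each chunk
-- # independently (token list joined once), strip one trailing dash per chunk,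
-- # and join the chunks with single spaces -- no global index/dash bookkeeping.
-- consonants = "pkhlmnw' "
--
-- vowels = {"a": "ah", "e": "eh", "i": "ee", "o": "oh", "u": "oo"}
--
-- doubleVowels = {"ai": "eye", "ae": "eye", "ao": "ow", "au": "ow", "ei": "ay", "eu": "eh-oo",
--                 "iu": "ew", "oi": "oyo", "ou": "ow", "ui": "ooey"}
--
--
-- def pronounce(text):
--     def say(chunk):
--         parts = []
--         i = 0
--         while i < len(chunk):
--             two = chunk[i:i + 2]
--             if two in doubleVowels:
--                 parts.append(doubleVowels[two])
--                 i += 2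
--             else:
--                 c = chunk[i]
--                 if c in vowels:
--                     parts.append(vowels[c] + "-")
--                 elif c in "pkhlmnw'":
--                     parts.append(c)
--                 i += 1
--         s = "".join(parts)
--         return s[:-1] if s.endswith("-") else s
--
--     return " ".join(say(chunk) for chunk in text.lower().split(" "))
-- ===== Notes on version B (the rewrite author's own statement) =====
-- stated objective: simpler
-- what changed: A walks the whole lowered text with one index loop that interleaves dash-stripping and space handling into a growing output string (quadratic string += and slicing); B splits the text on spaces, pronounces each space-free chunk independently into a token list joined once (stripping one trailing dash per chunk), and joins the chunk pronunciations with spaces.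
import Mathlib
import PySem

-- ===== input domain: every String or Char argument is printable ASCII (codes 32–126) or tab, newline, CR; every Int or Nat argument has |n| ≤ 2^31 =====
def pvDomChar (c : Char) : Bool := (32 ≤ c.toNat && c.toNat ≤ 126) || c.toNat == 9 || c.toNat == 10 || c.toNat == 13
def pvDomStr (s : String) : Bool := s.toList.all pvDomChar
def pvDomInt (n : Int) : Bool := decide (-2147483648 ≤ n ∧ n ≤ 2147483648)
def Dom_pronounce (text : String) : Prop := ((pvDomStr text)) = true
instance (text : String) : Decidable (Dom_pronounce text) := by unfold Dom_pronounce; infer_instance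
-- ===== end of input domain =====

-- B restructures A's single index loop with global dash/space bookkeeping (and its quadratic
-- string += / slicing) into "split on spaces, pronounce each chunk into a token list joined
-- once, join chunks with spaces" (objective: simpler; a timing run measured B faster).

-- ===== PORT A =====
-- the module dict doubleVowels, looked up on the two-char slice text[index:index+2]
def pvDV (c d : Char) : Option (List Char) :=
  if c = 'a' ∧ d = 'i' then some ['e','y','e']
  else if c = 'a' ∧ d = 'e' then some ['e','y','e']
  else if c = 'a' ∧ d = 'o' then some ['o','w']
  else if c = 'a' ∧ d = 'u' then some ['o','w']
  else if c = 'e' ∧ d = 'i' then some ['a','y']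
  else if c = 'e' ∧ d = 'u' then some ['e','h','-','o','o']
  else if c = 'i' ∧ d = 'u' then some ['e','w']
  else if c = 'o' ∧ d = 'i' then some ['o','y','o']
  else if c = 'o' ∧ d = 'u' then some ['o','w']
  else if c = 'u' ∧ d = 'i' then some ['o','o','e','y']
  else none

-- the module dict vowels
def pvVowel (c : Char) : Option (List Char) :=
  if c = 'a' then some ['a','h']
  else if c = 'e' then some ['e','h']
  else if c = 'i' then some ['e','e']
  else if c = 'o' then some ['o','h']
  else if c = 'u' then some ['o','o']
  else none

-- membership in the module string consonants = "pkhlmnw' " (space included, as in A)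
def pvIsCons (c : Char) : Bool :=
  c ∈ ['p','k','h','l','m','n','w','\'',' ']

-- A's single-character branches (vowel / space / consonant / skip); `none` is the
-- IndexError of output[-1] on empty output.  output[:-1] is dropLast (output nonempty there).
def pvStepA (c : Char) (out : List Char) : Option (List Char) :=
  match pvVowel c with
  | some v => some (out ++ v ++ ['-'])
  | none =>
    if c = ' ' then
      match PySem.List.pyGet? out (-1) with
      | none => none
      | some lastc => some ((if lastc = '-' then out.dropLast else out) ++ [' '])
    else if pvIsCons c then some (out ++ [c])
    else some out

-- A's while loop over index (state: remaining characters, accumulated output)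
def pvLoopA : List Char → List Char → Option (List Char)
  | [], out => some out
  | [c], out =>
      match pvStepA c out with
      | none => none
      | some o => pvLoopA [] o
  | c1 :: c2 :: rest, out =>
      match pvDV c1 c2 with
      | some s => pvLoopA rest (out ++ s)
      | none =>
        match pvStepA c1 out with
        | none => none
        | some o => pvLoopA (c2 :: rest) o

def pronounce (text : String) : String :=
  match pvLoopA (PySem.Chars.lower text.toList) [] with
  | none => ""          -- IndexError inside the loop (outside Pre_)
  | some out =>
    match PySem.List.pyGet? out (-1) with
    | none => ""        -- IndexError of the final output[-1] on empty output (outside Pre_)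
    | some lastc => String.ofList (if lastc = '-' then out.dropLast else out)

-- ===== PORT B =====
-- membership in "pkhlmnw'" (no space: chunks are space-free in B)
def pvIsConsB (c : Char) : Bool :=
  c ∈ ['p','k','h','l','m','n','w','\'']

-- B's inner while loop collecting `parts` (state: remaining chunk; parts in order)
def pvSayParts : List Char → List (List Char)
  | [] => []
  | [c] =>
      match pvVowel c with
      | some v => [v ++ ['-']]
      | none => if pvIsConsB c then [[c]] else []
  | c1 :: c2 :: rest =>
      match pvDV c1 c2 with
      | some s => s :: pvSayParts rest
      | none =>
        match pvVowel c1 with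
        | some v => (v ++ ['-']) :: pvSayParts (c2 :: rest)
        | none =>
          if pvIsConsB c1 then [c1] :: pvSayParts (c2 :: rest)
          else pvSayParts (c2 :: rest)

-- B's say(chunk): "".join(parts), then s[:-1] (= dropLast; s nonempty there) if s ends with '-'
def pvSay (chunk : List Char) : List Char :=
  let s := PySem.Chars.join [] (pvSayParts chunk)
  if PySem.Chars.endswith s ['-'] then s.dropLast else s

def pronounce_alt (text : String) : String :=
  let chunks := PySem.Chars.splitOn (PySem.Chars.lower text.toList) [' ']
  String.ofList (PySem.Chars.join [' '] (chunks.map pvSay))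

-- ===== PRECONDITION & SPEC =====
def pvEmitChar (c : Char) : Bool :=
  c ∈ ['a','e','i','o','u','p','k','h','l','m','n','w','\'']

-- Pre_ excludes exactly the inputs on which A raises IndexError (output[-1] on an empty
-- output): those where the lowered text up to the first space has no vowel/consonant.
def Pre_pronounce (text : String) : Prop :=
  ((PySem.Chars.lower text.toList).takeWhile (fun c => c ≠ ' ')).any pvEmitChar = true
instance (text : String) : Decidable (Pre_pronounce text) := by unfold Pre_pronounce; infer_instance

def pvWitness_pronounce : String := "Aloha kakou"

def Spec_pronounce (text : String) (out : String) : Prop := out = pronounce_alt text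
instance (text : String) (out : String) : Decidable (Spec_pronounce text out) := by unfold Spec_pronounce; infer_instance

-- ===== CLAIM (what is proved, stated in full; the proofs are below) =====
def Claim_equal_pronounce : Prop := ∀ (text : String), Dom_pronounce text → Pre_pronounce text → Spec_pronounce text (pronounce text)

-- ===== LEMMAS AND PROOFS =====

-- proof-side: the one-dash strip A performs before spaces and at the end
def pvStrip1 (out : List Char) : List Char :=
  if out.getLast? = some '-' then out.dropLast else out

-- proof-side: the raw (unstripped) emission of a chunk
def pvRaw (chunk : List Char) : List Char := (pvSayParts chunk).flatten

-- proof-side: recursive rendering of Python's str.split(" ")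
def pvSplit : List Char → List (List Char)
  | [] => [[]]
  | c :: rest =>
      if c = ' ' then [] :: pvSplit rest
      else (pvSplit rest).modifyHead (c :: ·)

-- proof-side: output shape produced by the loop on the chunks after the first space
def pvTail : List (List Char) → List Char
  | [] => []
  | [c] => pvRaw c
  | c :: rest => pvSay c ++ ' ' :: pvTail rest

-- [x] is a suffix exactly when the last element is x (shape used by endswith/Strip1)
theorem pvSuffix_singleton (l : List Char) (x : Char) : [x] <:+ l ↔ l.getLast? = some x := by
  constructor
  · rintro ⟨t, rfl⟩; simp
  · intro h
    obtain ⟨ys, rfl⟩ := List.getLast?_eq_some_iff.mp h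
    exact ⟨ys, rfl⟩

theorem pvIntercalate_nil (l : List (List Char)) :
    List.intercalate ([] : List Char) l = l.flatten := by
  induction l with
  | nil => rfl
  | cons h t ih => cases t <;> simp_all [List.intercalate, List.intersperse]

theorem pvIntercalate_cons₂ (sep x y : List Char) (t : List (List Char)) :
    List.intercalate sep (x :: y :: t) = x ++ sep ++ List.intercalate sep (y :: t) := by
  simp [List.intercalate, List.intersperse]

theorem pvDV_space_right (c : Char) : pvDV c ' ' = none := by
  simp [pvDV]

theorem pvDV_space_left (d : Char) : pvDV ' ' d = none := by
  simp [pvDV]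

theorem pvDV_ne_nil {c d : Char} {s : List Char} (h : pvDV c d = some s) : s ≠ [] := by
  intro hs; subst hs; unfold pvDV at h; split_ifs at h <;> simp_all

theorem pvIsCons_eq {c : Char} (h : c ≠ ' ') : pvIsCons c = pvIsConsB c := by
  simp [pvIsCons, pvIsConsB, h]

theorem pvSay_eq_strip (chunk : List Char) : pvSay chunk = pvStrip1 (pvRaw chunk) := by
  have hj : PySem.Chars.join [] (pvSayParts chunk) = pvRaw chunk := by
    simp [PySem.Chars.join, pvRaw, pvIntercalate_nil]
  by_cases h : (pvRaw chunk).getLast? = some '-'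
  · have he : PySem.Chars.endswith (pvRaw chunk) ['-'] = true :=
      (PySem.Chars.endswith_iff _ _).mpr ((pvSuffix_singleton _ _).mpr h)
    simp [pvSay, hj, pvStrip1, he, h]
  · have he : ¬ PySem.Chars.endswith (pvRaw chunk) ['-'] = true := fun hc =>
      h ((pvSuffix_singleton _ _).mp ((PySem.Chars.endswith_iff _ _).mp hc))
    simp [pvSay, hj, pvStrip1, he, h]

theorem pvStrip1_append (x y : List Char) (hx : x = [] ∨ x.getLast? = some ' ') :
    pvStrip1 (x ++ y) = x ++ pvStrip1 y := by
  rcases eq_or_ne y [] with rfl | hy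
  · rcases hx with rfl | hx
    · simp
    · have h : x.getLast? ≠ some '-' := by simp [hx]
      simp [pvStrip1, h]
  · rw [pvStrip1, pvStrip1, List.getLast?_append_of_ne_nil x hy,
      List.dropLast_append_of_ne_nil hy]
    split_ifs <;> rfl

-- loop over a space-free chunk followed by nothing or a space: pure emission
theorem pvLoopA_chunk (tail : List Char)
    (ht : tail = [] ∨ ∃ t, tail = ' ' :: t) :
    ∀ chunk, (∀ c ∈ chunk, c ≠ ' ') → ∀ out,
      pvLoopA (chunk ++ tail) out = pvLoopA tail (out ++ pvRaw chunk) := by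
  intro chunk
  induction chunk using pvSayParts.induct with
  | case1 => intro _ out; simp [pvRaw, pvSayParts]
  | case2 c v hv =>
      intro hsf out
      rcases ht with rfl | ⟨t, rfl⟩
      · simp [pvLoopA, pvStepA, hv, pvRaw, pvSayParts]
      · simp [pvLoopA, pvDV_space_right, pvStepA, hv, pvRaw, pvSayParts]
  | case3 c hv hb =>
      intro hsf out
      have hc : c ≠ ' ' := hsf c (by simp)
      rcases ht with rfl | ⟨t, rfl⟩
      · simp [pvLoopA, pvStepA, hv, hc, pvIsCons_eq hc, hb, pvRaw, pvSayParts]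
      · simp [pvLoopA, pvDV_space_right, pvStepA, hv, hc, pvIsCons_eq hc, hb, pvRaw, pvSayParts]
  | case4 c hv hb =>
      intro hsf out
      have hc : c ≠ ' ' := hsf c (by simp)
      have hb' : pvIsConsB c = false := by simpa using hb
      rcases ht with rfl | ⟨t, rfl⟩
      · simp [pvLoopA, pvStepA, hv, hc, pvIsCons_eq hc, hb', pvRaw, pvSayParts]
      · simp [pvLoopA, pvDV_space_right, pvStepA, hv, hc, pvIsCons_eq hc, hb', pvRaw, pvSayParts]
  | case5 c1 c2 rest s hdv ih =>
      intro hsf out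
      have := ih (fun c hc => hsf c (by simp at hc ⊢; tauto)) (out ++ s)
      simp only [pvRaw, pvSayParts, hdv] at this ⊢
      simp only [List.cons_append, pvLoopA, hdv] at this ⊢
      rw [this]; simp
  | case6 c1 c2 rest hdv v hv ih =>
      intro hsf out
      have := ih (fun c hc => hsf c (by simp at hc ⊢; tauto)) (out ++ v ++ ['-'])
      simp only [pvRaw, pvSayParts, hdv, hv] at this ⊢
      simp only [List.cons_append, pvLoopA, hdv, pvStepA, hv] at this ⊢
      rw [this]; simp
  | case7 c1 c2 rest hdv hv hb ih =>
      intro hsf out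
      have hc : c1 ≠ ' ' := hsf c1 (by simp)
      have := ih (fun c hc => hsf c (by simp at hc ⊢; tauto)) (out ++ [c1])
      simp [List.cons_append, pvLoopA, hdv, pvStepA, hv, hc, pvIsCons_eq hc, hb,
        pvRaw, pvSayParts] at this ⊢
      simp [this]
  | case8 c1 c2 rest hdv hv hb ih =>
      intro hsf out
      have hc : c1 ≠ ' ' := hsf c1 (by simp)
      have hb' : pvIsConsB c1 = false := by simpa using hb
      have := ih (fun c hc => hsf c (by simp at hc ⊢; tauto)) out
      simp [List.cons_append, pvLoopA, hdv, pvStepA, hv, hc, pvIsCons_eq hc, hb',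
        pvRaw, pvSayParts] at this ⊢
      simp [this]

theorem pvEmit_iff (c : Char) :
    pvEmitChar c = true ↔ (pvVowel c).isSome = true ∨ pvIsConsB c = true := by
  simp [pvEmitChar, pvVowel, pvIsConsB]
  split_ifs <;> simp_all <;> tauto

theorem pvRaw_ne_of_any {chunk : List Char} (h : chunk.any pvEmitChar = true) :
    pvRaw chunk ≠ [] := by
  induction chunk using pvSayParts.induct with
  | case1 => simp at h
  | case2 c v hv => simp [pvRaw, pvSayParts, hv]
  | case3 c hv hb => simp [pvRaw, pvSayParts, hv, hb]
  | case4 c hv hb =>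
      simp at h
      rcases (pvEmit_iff c).mp h with h' | h'
      · simp [hv] at h'
      · exact absurd h' hb
  | case5 c1 c2 rest s hdv ih =>
      simp [pvRaw, pvSayParts, hdv, pvDV_ne_nil hdv]
  | case6 c1 c2 rest hdv v hv ih =>
      simp [pvRaw, pvSayParts, hdv, hv]
  | case7 c1 c2 rest hdv hv hb ih =>
      simp [pvRaw, pvSayParts, hdv, hv, hb]
  | case8 c1 c2 rest hdv hv hb ih =>
      have hb' : pvIsConsB c1 = false := by simpa using hb
      have h' : (c2 :: rest).any pvEmitChar = true := by
        simp at h ⊢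
        rcases h with h | h
        · exact absurd ((pvEmit_iff c1).mp h) (by simp [hv, hb'])
        · exact h
      simpa [pvRaw, pvSayParts, hdv, hv, hb'] using ih h'

theorem pvSplit_ne_nil (cs : List Char) : pvSplit cs ≠ [] := by
  induction cs with
  | nil => simp [pvSplit]
  | cons c rest ih =>
      by_cases h : c = ' '
      · simp [pvSplit, h]
      · simp only [pvSplit, if_neg h]
        cases hr : pvSplit rest with
        | nil => exact absurd hr ih
        | cons a t => simp

theorem pvSplit_spacefree (cs : List Char) :
    ∀ ch ∈ pvSplit cs, ∀ c ∈ ch, c ≠ ' ' := by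
  induction cs with
  | nil => simp [pvSplit]
  | cons c rest ih =>
      by_cases h : c = ' '
      · simpa [pvSplit, h] using ih
      · simp only [pvSplit, if_neg h]
        cases hr : pvSplit rest with
        | nil => exact absurd hr (pvSplit_ne_nil rest)
        | cons a t =>
            rw [hr] at ih
            intro ch hch
            simp at hch
            rcases hch with rfl | hch
            · intro x hx
              rcases List.mem_cons.mp hx with rfl | hx
              · exact h
              · exact ih a (by simp) x hx
            · exact ih ch (by simp [hch])

theorem pvSplit_intercalate (cs : List Char) :
    List.intercalate [' '] (pvSplit cs) = cs := by
  induction cs with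
  | nil => simp [pvSplit, List.intercalate]
  | cons c rest ih =>
      by_cases h : c = ' '
      · subst h
        cases hr : pvSplit rest with
        | nil => exact absurd hr (pvSplit_ne_nil rest)
        | cons a t =>
            rw [hr] at ih
            simp only [pvSplit, hr, reduceIte]
            rw [pvIntercalate_cons₂]
            simp [ih]
      · simp only [pvSplit, if_neg h]
        cases hr : pvSplit rest with
        | nil => exact absurd hr (pvSplit_ne_nil rest)
        | cons a t =>
            rw [hr] at ih
            cases t with
            | nil => simpa [List.intercalate] using congrArg (c :: ·) (by simpa [List.intercalate] using ih)
            | cons b t' =>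
                rw [List.modifyHead_cons, pvIntercalate_cons₂] at *
                simp at ih ⊢
                simp [ih]
  
theorem pvSplit_head (cs : List Char) :
    (pvSplit cs).head? = some (cs.takeWhile (fun c => c ≠ ' ')) := by
  induction cs with
  | nil => simp [pvSplit]
  | cons c rest ih =>
      by_cases h : c = ' '
      · simp [pvSplit, h]
      · simp only [pvSplit, if_neg h]
        cases hr : pvSplit rest with
        | nil => exact absurd hr (pvSplit_ne_nil rest)
        | cons a t =>
            rw [hr] at ih
            simp at ih
            simp [List.takeWhile_cons, h, ih]

theorem pvModifyHead_nil (l : List (List Char)) :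
    l.modifyHead (fun h => ([] : List Char) ++ h) = l := by
  cases l <;> simp

theorem pvModifyHead_id (l : List (List Char)) :
    l.modifyHead (fun h => h) = l := by
  cases l <;> simp

theorem pvGo_eq (fuel : Nat) :
    ∀ (l cur : List Char) (accs : List (List Char)), l.length < fuel →
      PySem.Chars.splitOn.go [' '] fuel l cur accs =
        accs.reverse ++ (pvSplit l).modifyHead (fun h => cur.reverse ++ h) := by
  induction fuel with
  | zero => intro l cur accs h; omega
  | succ n ih =>
      intro l cur accs h
      cases l with
      | nil => simp [PySem.Chars.splitOn.go, pvSplit]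
      | cons c rest =>
          by_cases hc : c = ' '
          · subst hc
            have hpre : List.isPrefixOf [' '] (' ' :: rest) = true := by
              simp [List.isPrefixOf]
            rw [PySem.Chars.splitOn.go, if_pos hpre]
            simp only [List.length_cons, List.drop_succ_cons, List.length_nil, List.drop_zero]
            rw [ih rest [] (List.reverse cur :: accs) (by simp at h; omega)]
            simp [pvSplit, pvModifyHead_nil, pvModifyHead_id]
          · have hpre : List.isPrefixOf [' '] (c :: rest) = false := by
              simp [List.isPrefixOf]
              intro h'; exact absurd h'.symm hc
            rw [PySem.Chars.splitOn.go, if_neg (by simp [hpre])]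
            rw [ih rest (c :: cur) accs (by simp at h; omega)]
            simp only [pvSplit, if_neg hc]
            cases hr : pvSplit rest with
            | nil => exact absurd hr (pvSplit_ne_nil rest)
            | cons a t => simp

theorem pvSplitOn_eq (cs : List Char) :
    PySem.Chars.splitOn cs [' '] = pvSplit cs := by
  rw [PySem.Chars.splitOn, pvGo_eq (cs.length + 1) cs [] [] (by omega)]
  simp [pvModifyHead_nil, pvModifyHead_id]

theorem pvLoopA_space (t out : List Char) (hout : out ≠ []) :
    pvLoopA (' ' :: t) out = pvLoopA t (pvStrip1 out ++ [' ']) := by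
  obtain ⟨l, hl⟩ := Option.isSome_iff_exists.mp (List.getLast?_isSome.mpr hout)
  cases t with
  | nil =>
      simp [pvLoopA, pvStepA, pvVowel, PySem.List.pyGet?_neg_one, hl, pvStrip1]
  | cons a t' =>
      simp [pvLoopA, pvDV_space_left, pvStepA, pvVowel, PySem.List.pyGet?_neg_one, hl, pvStrip1]

-- the loop over the remaining chunks, once the output already ends with a space
theorem pvLoopA_chunks :
    ∀ chunks : List (List Char), chunks ≠ [] → (∀ ch ∈ chunks, ∀ c ∈ ch, c ≠ ' ') →
      ∀ out : List Char, out.getLast? = some ' ' →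
        pvLoopA (List.intercalate [' '] chunks) out = some (out ++ pvTail chunks) := by
  intro chunks
  induction chunks with
  | nil => intro h; exact absurd rfl h
  | cons c rest ih =>
      intro _ hsf out hout
      have hone : out ≠ [] := by intro h; simp [h] at hout
      cases rest with
      | nil =>
          have := pvLoopA_chunk [] (Or.inl rfl) c (hsf c (by simp)) out
          simpa [List.intercalate, pvTail] using this
      | cons r rs =>
          rw [pvIntercalate_cons₂, List.append_assoc]
          simp only [List.singleton_append]
          rw [pvLoopA_chunk (' ' :: List.intercalate [' '] (r :: rs))
                (Or.inr ⟨_, rfl⟩) c (hsf c (by simp)) out]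
          rw [pvLoopA_space _ _ (by simp [hone])]
          rw [pvStrip1_append out _ (Or.inr hout), ← pvSay_eq_strip]
          rw [List.append_assoc]
          rw [ih (by simp) (fun ch hch => hsf ch (List.mem_cons_of_mem c hch))
                (out ++ (pvSay c ++ [' '])) (by simp)]
          simp [pvTail]

theorem pvTail_strip :
    ∀ chunks : List (List Char), chunks ≠ [] →
      ∀ x : List Char, x.getLast? = some ' ' →
        pvStrip1 (x ++ pvTail chunks) = x ++ List.intercalate [' '] (chunks.map pvSay) := by
  intro chunks
  induction chunks with
  | nil => intro h; exact absurd rfl h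
  | cons c rest ih =>
      intro _ x hx
      cases rest with
      | nil =>
          rw [pvTail, pvStrip1_append x _ (Or.inr hx), ← pvSay_eq_strip]
          simp [List.intercalate]
      | cons r rs =>
          have := ih (by simp) (x ++ (pvSay c ++ [' '])) (by simp)
          rw [show pvTail (c :: r :: rs) = pvSay c ++ ' ' :: pvTail (r :: rs) from rfl]
          rw [show x ++ (pvSay c ++ ' ' :: pvTail (r :: rs)) =
                (x ++ (pvSay c ++ [' '])) ++ pvTail (r :: rs) by simp]
          rw [this]
          simp [pvIntercalate_cons₂]


-- ===== VERDICT (by name: the statement is the Claim_ definition above) =====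
theorem pronounce_spec : Claim_equal_pronounce := by
  unfold Claim_equal_pronounce
  intro text _ hpre
  unfold Spec_pronounce pronounce pronounce_alt
  rw [pvSplitOn_eq]
  set cs := PySem.Chars.lower text.toList with hcs
  unfold Pre_pronounce at hpre
  rw [← hcs] at hpre
  obtain ⟨rest, hsplit⟩ : ∃ rest, pvSplit cs = (cs.takeWhile (fun c => c ≠ ' ')) :: rest := by
    cases h : pvSplit cs with
    | nil => exact absurd h (pvSplit_ne_nil cs)
    | cons a t =>
        have hh := pvSplit_head cs
        rw [h] at hh
        simp at hh
        refine ⟨t, ?_⟩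
        rw [hh]
        simp [decide_not]
  set c0 := cs.takeWhile (fun c => c ≠ ' ') with hc0
  have hsf := pvSplit_spacefree cs
  rw [hsplit] at hsf
  have hcseq : cs = List.intercalate [' '] (c0 :: rest) := by
    rw [← hsplit, pvSplit_intercalate]
  have hraw : pvRaw c0 ≠ [] := pvRaw_ne_of_any hpre
  rw [hsplit]
  cases rest with
  | nil =>
      have hloop : pvLoopA cs [] = some (pvRaw c0) := by
        rw [hcseq]
        simpa [List.intercalate] using
          pvLoopA_chunk [] (Or.inl rfl) c0 (hsf c0 (by simp)) []
      obtain ⟨l, hl⟩ := Option.isSome_iff_exists.mp (List.getLast?_isSome.mpr hraw)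
      rw [hloop]
      simp only [PySem.List.pyGet?_neg_one, hl]
      have : (if l = '-' then (pvRaw c0).dropLast else pvRaw c0) = pvStrip1 (pvRaw c0) := by
        simp [pvStrip1, hl]
      rw [this, ← pvSay_eq_strip]
      simp [PySem.Chars.join, List.intercalate]
  | cons r rs =>
      have hloop : pvLoopA cs [] =
          some (pvSay c0 ++ [' '] ++ pvTail (r :: rs)) := by
        rw [hcseq, pvIntercalate_cons₂, List.append_assoc]
        simp only [List.singleton_append]
        rw [pvLoopA_chunk (' ' :: List.intercalate [' '] (r :: rs))
              (Or.inr ⟨_, rfl⟩) c0 (hsf c0 (by simp)) []]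
        rw [List.nil_append]
        rw [pvLoopA_space _ _ hraw, ← pvSay_eq_strip]
        rw [pvLoopA_chunks (r :: rs) (by simp)
              (fun ch hch => hsf ch (List.mem_cons_of_mem c0 hch)) (pvSay c0 ++ [' ']) (by simp)]
      set out := pvSay c0 ++ [' '] ++ pvTail (r :: rs) with hout
      have houtne : out ≠ [] := by simp [hout]
      obtain ⟨l, hl⟩ := Option.isSome_iff_exists.mp (List.getLast?_isSome.mpr houtne)
      rw [hloop]
      simp only [PySem.List.pyGet?_neg_one, hl]
      have h1 : (if l = '-' then out.dropLast else out) = pvStrip1 out := by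
        simp [pvStrip1, hl]
      rw [h1, hout]
      rw [pvTail_strip (r :: rs) (by simp) (pvSay c0 ++ [' ']) (by simp)]
      simp [PySem.Chars.join, pvIntercalate_cons₂]
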